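-- pv_equiv track=rewrite | github.com/broadcaststorm/advent-of-code | 2019/08/part1.py | parse_image
-- ===== SOURCE A (Python) =====
-- def parse_image(wide, tall, line):
--     """
--     parse_image(wide, tall, line):  Given the width and height of a image,
--     build a dictionary using tuple x,y as keys and values being lists of
--     the layer pixel values.
--
--     d = { (x, y) : [ l1, l2, ... ] }
--     """
--
--     pixels = wide * tall
--
--     image = {}
--
--     for i in range(wide):
--         for j in range(tall):
--             image[(i, j)] = []
--
--     for p in range(len(line)):
--         grid = p % pixels
--         j = grid // wide
--         i = grid % wide
--
--         image[(i, j)].append(line[p])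
--
--     return image
-- ===== SOURCE B (Python) =====
-- def parse_image(wide, tall, line):
--     """
--     parse_image(wide, tall, line):  Given the width and height of a image,
--     build a dictionary using tuple x,y as keys and values being lists of
--     the layer pixel values.
--
--     d = { (x, y) : [ l1, l2, ... ] }
--     """
--
--     pixels = wide * tall
--
--     return {
--         (i, j): [line[p] for p in range(j * wide + i, len(line), pixels)]
--         for i in range(wide)
--         for j in range(tall)
--     }
-- ===== Notes on version B (the rewrite author's own statement) =====
-- stated objective: simpler
-- what changed: Instead of initialising every key and then appending pixel by pixel with per-pixel div/mod arithmetic, B loops over the coordinates once and gathers each coordinate's layer values directly with a strided index range (one dict comprehension, no mutation).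
import Mathlib
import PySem

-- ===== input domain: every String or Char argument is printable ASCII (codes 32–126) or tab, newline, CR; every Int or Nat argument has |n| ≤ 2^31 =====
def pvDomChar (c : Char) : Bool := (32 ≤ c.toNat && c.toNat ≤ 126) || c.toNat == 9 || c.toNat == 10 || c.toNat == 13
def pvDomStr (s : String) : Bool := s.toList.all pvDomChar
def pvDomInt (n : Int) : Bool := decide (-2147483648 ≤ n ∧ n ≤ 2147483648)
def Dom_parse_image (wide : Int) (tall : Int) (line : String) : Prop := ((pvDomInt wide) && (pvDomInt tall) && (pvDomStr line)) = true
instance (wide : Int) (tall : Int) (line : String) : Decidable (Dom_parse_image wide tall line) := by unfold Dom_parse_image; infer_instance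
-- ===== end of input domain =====

-- B replaces A's initialise-then-append pass (with per-pixel div/mod arithmetic) by one loop over
-- the coordinates that gathers each coordinate's layer values with a strided index range (objective: simpler).

-- shared convention helper: Python's line[p], a one-character string (both ports index in range)
def pvChar (line : String) (p : Int) : String :=
  ((PySem.Str.pyGet? line p).map (fun c => String.ofList [c])).getD ""

-- ===== PORT A =====
def parse_image (wide : Int) (tall : Int) (line : String) : List (Int × Int × List String) :=
  let pixels := wide * tall
  let image0 : PySem.Dict (Int × Int) (List String) :=
    (PySem.List.pyRange 0 wide 1).foldl
      (fun d i => (PySem.List.pyRange 0 tall 1).foldl (fun d j => d.insert (i, j) []) d)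
      PySem.Dict.empty
  let image :=
    (PySem.List.pyRange 0 (PySem.Str.len line) 1).foldl
      (fun d p =>
        let grid := PySem.Int.mod p pixels
        let j := PySem.Int.floordiv grid wide
        let i := PySem.Int.mod grid wide
        d.modify (i, j) [] (fun v => v ++ [pvChar line p]))
      image0
  image.items.map (fun kv => (kv.1.1, kv.1.2, kv.2))

-- ===== PORT B =====
def parse_image_alt (wide : Int) (tall : Int) (line : String) : List (Int × Int × List String) :=
  let pixels := wide * tall
  (PySem.List.pyRange 0 wide 1).flatMap (fun i =>
    (PySem.List.pyRange 0 tall 1).map (fun j =>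
      (i, j, (PySem.List.pyRange (j * wide + i) (PySem.Str.len line) pixels).map (pvChar line))))

-- ===== PRECONDITION & SPEC =====
-- Pre_ excludes exactly the inputs on which A raises (a nonempty line with an empty coordinate
-- grid: ZeroDivisionError when wide*tall == 0, otherwise KeyError).
def Pre_parse_image (wide : Int) (tall : Int) (line : String) : Prop :=
  line = "" ∨ (0 < wide ∧ 0 < tall)
instance (wide : Int) (tall : Int) (line : String) : Decidable (Pre_parse_image wide tall line) := by
  unfold Pre_parse_image; infer_instance

def pvWitness_parse_image : Int × Int × String := (2, 2, "01100110")

def Spec_parse_image (wide : Int) (tall : Int) (line : String) (out : List (Int × Int × List String)) : Prop := out = parse_image_alt wide tall line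
instance (wide : Int) (tall : Int) (line : String) (out : List (Int × Int × List String)) : Decidable (Spec_parse_image wide tall line out) := by unfold Spec_parse_image; infer_instance

-- ===== CLAIM (what is proved, stated in full; the proofs are below) =====
def Claim_equal_parse_image : Prop := ∀ (wide : Int) (tall : Int) (line : String), Dom_parse_image wide tall line → Pre_parse_image wide tall line → Spec_parse_image wide tall line (parse_image wide tall line)

-- ===== LEMMAS AND PROOFS =====

def pvCoords (wide tall : Int) : List (Int × Int) :=
  (PySem.List.pyRange 0 wide 1).flatMap (fun i =>
    (PySem.List.pyRange 0 tall 1).map (fun j => (i, j)))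


lemma pvCoords_nodup (wide tall : Int) :
    ((PySem.List.pyRange 0 wide 1).flatMap (fun i => (PySem.List.pyRange 0 tall 1).map (fun j => (i, j)))).Nodup := by
  have : ((PySem.List.pyRange 0 wide 1).flatMap (fun i => (PySem.List.pyRange 0 tall 1).map (fun j => (i, j))))
      = (PySem.List.pyRange 0 wide 1) ×ˢ (PySem.List.pyRange 0 tall 1) := rfl
  rw [this]
  exact List.Nodup.product (PySem.List.nodup_pyRange_one _ _) (PySem.List.nodup_pyRange_one _ _)

lemma filter_stride (n s step : Int) (hstep : 0 < step) (hs0 : 0 ≤ s) (hs : s < step) :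
    (PySem.List.pyRange 0 n 1).filter (fun p => PySem.Int.mod p step == s)
      = PySem.List.pyRange s n step := by
  have hsortR : List.Pairwise (· < ·) (PySem.List.pyRange s n step) := by
    rw [PySem.List.pyRange_of_pos _ _ hstep]
    refine List.pairwise_map.2 ?_
    refine (List.pairwise_lt_range).imp ?_
    intro a b h
    have : (step : Int) * a < step * b := by
      apply mul_lt_mul_of_pos_left (by exact_mod_cast h) hstep
    omega
  have hsortL : List.Pairwise (· < ·) ((PySem.List.pyRange 0 n 1).filter (fun p => PySem.Int.mod p step == s)) :=
    (PySem.List.pairwise_lt_pyRange_one 0 n).filter _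
  have hmem : ∀ x, x ∈ (PySem.List.pyRange 0 n 1).filter (fun p => PySem.Int.mod p step == s) ↔
      x ∈ PySem.List.pyRange s n step := by
    intro x
    rw [List.mem_filter, PySem.List.mem_pyRange_iff_of_pos hstep, PySem.List.mem_pyRange_one]
    rw [PySem.Int.mod_eq_emod_of_pos hstep]
    constructor
    · rintro ⟨⟨h0, hn⟩, hmod⟩
      have hmod' : x % step = s := by simpa using hmod
      have hdvd : step ∣ x - s := by
        refine ⟨x / step, ?_⟩
        have := Int.emod_add_ediv x step
        omega
      have hx : s ≤ x := by
        have h1 : x % step = s := hmod'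
        have h2 := Int.emod_add_ediv x step
        have h3 : 0 ≤ x / step := Int.ediv_nonneg h0 hstep.le
        nlinarith
      exact ⟨hx, hn, hdvd⟩
    · rintro ⟨hsx, hn, ⟨k, hk⟩⟩
      have h0 : 0 ≤ x := by omega
      have : x % step = s := by
        have : x = s + step * k := by omega
        rw [this, Int.add_mul_emod_self_left]
        exact Int.emod_eq_of_lt hs0 hs
      exact ⟨⟨h0, hn⟩, by simpa using this⟩
  have hnodL : ((PySem.List.pyRange 0 n 1).filter (fun p => PySem.Int.mod p step == s)).Nodup :=
    hsortL.imp ne_of_lt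
  have hnodR : (PySem.List.pyRange s n step).Nodup := hsortR.imp ne_of_lt
  exact List.Perm.eq_of_pairwise
    (fun a b _ _ (h1 : a < b) (h2 : b < a) => absurd h2 (not_lt.2 h1.le)) hsortL hsortR
    ((List.perm_ext_iff_of_nodup hnodL hnodR).2 hmem)

lemma coord_eq_iff (wide tall p i j : Int) (hw : 0 < wide) (ht : 0 < tall)
    (hi0 : 0 ≤ i) (hi : i < wide) :
    ((PySem.Int.mod (PySem.Int.mod p (wide * tall)) wide,
      PySem.Int.floordiv (PySem.Int.mod p (wide * tall)) wide) = (i, j))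
      ↔ PySem.Int.mod p (wide * tall) = j * wide + i := by
  have hpix : (0:Int) < wide * tall := mul_pos hw ht
  rw [PySem.Int.mod_eq_emod_of_pos hpix]
  set g := p % (wide * tall) with hg
  rw [PySem.Int.mod_eq_emod_of_pos hw, PySem.Int.floordiv_eq_ediv_of_pos hw]
  have hdm := Int.emod_add_ediv g wide
  have hmb0 : 0 ≤ g % wide := Int.emod_nonneg g (by omega)
  have hmb : g % wide < wide := Int.emod_lt_of_pos g hw
  constructor
  · rintro h
    rw [Prod.mk.injEq] at h
    obtain ⟨h1, h2⟩ := h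
    have h3 : wide * (g / wide) = j * wide := by rw [h2]; ring
    omega
  · intro h
    have hq : g / wide = j ∧ g % wide = i := by
      have hc : j * wide = wide * j := mul_comm _ _
      have h1 : g = i + wide * j := by omega
      constructor
      · rw [h1, Int.add_mul_ediv_left _ _ (by omega : wide ≠ 0), Int.ediv_eq_zero_of_lt hi0 hi]
        ring
      · rw [h1, Int.add_mul_emod_self_left]
        exact Int.emod_eq_of_lt hi0 hi
    simp [hq.1, hq.2]

lemma contains_eq_false_of_not_mem {items : List ((Int × Int) × List String)} {k : Int × Int}
    (h : k ∉ items.map Prod.fst) : (PySem.Dict.mk items).contains k = false := by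
  simp only [PySem.Dict.contains, List.any_eq_false]
  intro p hp
  simp only [beq_iff_eq]
  intro he
  exact h (List.mem_map.2 ⟨p, hp, he ▸ rfl⟩)

lemma items_foldl_insert_fresh (l : List (Int × Int)) :
    ∀ (items : List ((Int × Int) × List String)),
    (∀ k ∈ l, k ∉ items.map Prod.fst) → l.Nodup →
    ((l.foldl (fun d k => d.insert k ([] : List String)) (PySem.Dict.mk items)).items)
      = items ++ l.map (fun k => (k, [])) := by
  induction l with
  | nil => intro items _ _; simp
  | cons k l ih =>
    intro items hfresh hnd
    simp only [List.foldl_cons]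
    have hc : (PySem.Dict.mk items).contains k = false :=
      contains_eq_false_of_not_mem (hfresh k (by simp))
    have hins : ((PySem.Dict.mk items).insert k ([] : List String)) = PySem.Dict.mk (items ++ [(k, [])]) := by
      apply PySem.Dict.ext
      simpa using PySem.Dict.items_insert_of_not_contains _ _ hc
    rw [hins, ih (items ++ [(k, [])]) ?_ hnd.of_cons]
    · simp
    · intro k' hk'
      simp only [List.map_append, List.mem_append, List.map_cons, List.map_nil]
      rintro (h | h)
      · exact hfresh k' (by simp [hk']) h
      · simp only [List.mem_singleton] at h
        rcases List.nodup_cons.1 hnd with ⟨hk, _⟩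
        exact hk (h ▸ hk')

lemma items_foldl_modify (l : List ((Int × Int) × String)) :
    ∀ (items : List ((Int × Int) × List String)),
    (items.map Prod.fst).Nodup → (∀ q ∈ l, q.1 ∈ items.map Prod.fst) →
    ((l.foldl (fun d q => d.modify q.1 [] (fun v => v ++ [q.2])) (PySem.Dict.mk items)).items)
      = items.map (fun kv => (kv.1, kv.2 ++ (l.filter (fun q => q.1 == kv.1)).map Prod.snd)) := by
  induction l with
  | nil =>
    intro items _ _
    simp
  | cons q l ih =>
    intro items hnd hmem
    simp only [List.foldl_cons]
    -- the modify step rewrites the items entrywise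
    have hcont : (PySem.Dict.mk items).contains q.1 = true := by
      simp only [PySem.Dict.contains, List.any_eq_true]
      rcases List.mem_map.1 (hmem q (by simp)) with ⟨p, hp, he⟩
      exact ⟨p, hp, by simp [he]⟩
    have hgetD : ∀ p ∈ items, (p.1 == q.1) = true →
        (PySem.Dict.mk items).getD q.1 [] = p.2 := by
      intro p hp he
      have h1 : p.1 = q.1 := by simpa using he
      have hp' : (q.1, p.2) ∈ (PySem.Dict.mk items).items := by
        have : (p.1, p.2) ∈ items := by simpa using hp
        simpa [h1] using this
      exact PySem.Dict.getD_of_mem_items _ hp' (by simpa [PySem.Dict.keys] using hnd) []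
    have hstep : (((PySem.Dict.mk items).modify q.1 [] (fun v => v ++ [q.2])).items)
        = items.map (fun kv => if kv.1 == q.1 then (kv.1, kv.2 ++ [q.2]) else kv) := by
      simp only [PySem.Dict.modify]
      rw [PySem.Dict.items_insert_of_contains _ _ hcont]
      apply List.map_congr_left
      intro p hp
      by_cases he : (p.1 == q.1) = true
      · have h1 : p.1 = q.1 := by simpa using he
        rw [if_pos he, if_pos (by simp [h1]), hgetD p hp he, h1]
      · rw [if_neg he, if_neg (by simpa using he)]
    have hmod : ((PySem.Dict.mk items).modify q.1 [] (fun v => v ++ [q.2]))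
        = PySem.Dict.mk (items.map (fun kv => if kv.1 == q.1 then (kv.1, kv.2 ++ [q.2]) else kv)) := by
      apply PySem.Dict.ext
      simpa using hstep
    have hfst : (items.map (fun kv => if kv.1 == q.1 then (kv.1, kv.2 ++ [q.2]) else kv)).map Prod.fst
        = items.map Prod.fst := by
      rw [List.map_map]
      apply List.map_congr_left
      intro p _
      by_cases he : p.1 = q.1
      · simp [he]
      · simp [he]
    rw [hmod, ih _ (by rw [hfst]; exact hnd) (by rw [hfst]; intro r hr; exact hmem r (by simp [hr]))]
    rw [List.map_map]
    apply List.map_congr_left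
    intro p _
    by_cases he : (p.1 == q.1) = true
    · have h1 : p.1 = q.1 := by simpa using he
      simp only [Function.comp_apply, if_pos he, List.filter_cons]
      rw [if_pos (by simpa using h1.symm)]
      simp [List.append_assoc]
    · have h1 : ¬ (q.1 == p.1) = true := by
        simp only [beq_iff_eq] at he ⊢
        exact fun h => he h.symm
      simp only [Function.comp_apply, if_neg he, List.filter_cons, if_neg h1]


lemma pvCoords_nodup' (wide tall : Int) : (pvCoords wide tall).Nodup :=
  pvCoords_nodup wide tall

lemma items_image0 (wide tall : Int) :
    (((PySem.List.pyRange 0 wide 1).foldl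
        (fun d i => (PySem.List.pyRange 0 tall 1).foldl (fun d j => d.insert (i, j) ([] : List String)) d)
        PySem.Dict.empty).items)
      = (pvCoords wide tall).map (fun k => (k, [])) := by
  have h1 : ∀ (i : Int) (d : PySem.Dict (Int × Int) (List String)),
      (PySem.List.pyRange 0 tall 1).foldl (fun d j => d.insert (i, j) ([] : List String)) d
        = ((PySem.List.pyRange 0 tall 1).map (fun j => (i, j))).foldl
            (fun d k => d.insert k ([] : List String)) d := by
    intro i d
    rw [List.foldl_map]
  simp only [h1]
  rw [← List.foldl_flatMap]
  have : PySem.Dict.empty = PySem.Dict.mk ([] : List ((Int × Int) × List String)) := rfl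
  rw [this]
  rw [show (PySem.List.pyRange 0 wide 1).flatMap (fun i => (PySem.List.pyRange 0 tall 1).map (fun j => (i, j)))
      = pvCoords wide tall from rfl]
  rw [items_foldl_insert_fresh (pvCoords wide tall) [] (by simp) (pvCoords_nodup' wide tall)]
  simp

-- the modify fold in A's shape
lemma items_foldl_modify' (coordf : Int → Int × Int) (charf : Int → String) (ps : List Int)
    (items : List ((Int × Int) × List String))
    (hnd : (items.map Prod.fst).Nodup) (hmem : ∀ p ∈ ps, coordf p ∈ items.map Prod.fst) :
    ((ps.foldl (fun d p => d.modify (coordf p) [] (fun v => v ++ [charf p])) (PySem.Dict.mk items)).items)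
      = items.map (fun kv => (kv.1, kv.2 ++ (ps.filter (fun p => coordf p == kv.1)).map charf)) := by
  have h := items_foldl_modify (ps.map fun p => (coordf p, charf p)) items hnd
    (by intro q hq; rcases List.mem_map.1 hq with ⟨p, hp, he⟩; exact he ▸ hmem p hp)
  rw [List.foldl_map] at h
  simpa [List.filter_map, Function.comp, List.map_map] using h

lemma main_eq : ∀ (wide tall : Int) (line : String),
    (line = "" ∨ (0 < wide ∧ 0 < tall)) → parse_image wide tall line = parse_image_alt wide tall line := by
  intro wide tall line hpre
  by_cases hwt : 0 < wide ∧ 0 < tall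
  case neg =>
    have hline : line = "" := by tauto
    subst hline
    have hlen : PySem.Str.len "" = 0 := by decide
    have hcoords : pvCoords wide tall = [] := by
      unfold pvCoords
      rcases not_and_or.1 hwt with h | h
      · rw [PySem.List.pyRange_one_eq_nil (a := (0:Int)) (b := wide) (by omega)]; simp
      · rw [PySem.List.pyRange_one_eq_nil (a := (0:Int)) (b := tall) (by omega)]
        simp
    simp only [parse_image, parse_image_alt, hlen]
    rw [PySem.List.pyRange_one_eq_nil (by omega : (0:Int) ≤ 0)]
    simp only [List.foldl_nil]
    rw [items_image0, hcoords]
    have : (PySem.List.pyRange 0 wide 1).flatMap (fun i =>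
        (PySem.List.pyRange 0 tall 1).map (fun j =>
          (i, j, (PySem.List.pyRange (j * wide + i) 0 (wide * tall)).map (pvChar "")))) = [] := by
      rcases not_and_or.1 hwt with h | h
      · rw [PySem.List.pyRange_one_eq_nil (a := (0:Int)) (b := wide) (by omega)]; simp
      · rw [PySem.List.pyRange_one_eq_nil (a := (0:Int)) (b := tall) (by omega)]
        simp
    rw [this]
    simp
  case pos =>
    obtain ⟨hw, ht⟩ := hwt
    set n := PySem.Str.len line with hn
    have hn0 : 0 ≤ n := by simp [hn, PySem.Str.len]
    have hpix : (0 : Int) < wide * tall := mul_pos hw ht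
    set coordf : Int → Int × Int := fun p =>
      (PySem.Int.mod (PySem.Int.mod p (wide * tall)) wide,
       PySem.Int.floordiv (PySem.Int.mod p (wide * tall)) wide) with hcoordf
    -- key facts about coordf on nonneg p
    have hcf : ∀ p : Int, 0 ≤ PySem.Int.mod p (wide * tall) ∧ PySem.Int.mod p (wide * tall) < wide * tall := by
      intro p
      rw [PySem.Int.mod_eq_emod_of_pos hpix]
      exact ⟨Int.emod_nonneg p (by omega), Int.emod_lt_of_pos p hpix⟩
    have hcmem : ∀ p : Int, coordf p ∈ pvCoords wide tall := by
      intro p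
      obtain ⟨hg0, hg1⟩ := hcf p
      set g := PySem.Int.mod p (wide * tall) with hg
      have h1 : 0 ≤ PySem.Int.mod g wide ∧ PySem.Int.mod g wide < wide := by
        rw [PySem.Int.mod_eq_emod_of_pos hw]
        exact ⟨Int.emod_nonneg g (by omega), Int.emod_lt_of_pos g hw⟩
      have h2 : 0 ≤ PySem.Int.floordiv g wide ∧ PySem.Int.floordiv g wide < tall := by
        rw [PySem.Int.floordiv_eq_ediv_of_pos hw]
        refine ⟨Int.ediv_nonneg hg0 hw.le, ?_⟩
        rw [Int.ediv_lt_iff_lt_mul hw]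
        nlinarith
      unfold pvCoords
      rw [List.mem_flatMap]
      refine ⟨PySem.Int.mod g wide, ?_, ?_⟩
      · rw [PySem.List.mem_pyRange_one]; omega
      · rw [List.mem_map]
        exact ⟨PySem.Int.floordiv g wide, by rw [PySem.List.mem_pyRange_one]; omega, rfl⟩
    -- unfold A
    show (((PySem.List.pyRange 0 n 1).foldl
        (fun d p => d.modify (coordf p) [] (fun v => v ++ [pvChar line p]))
        ((PySem.List.pyRange 0 wide 1).foldl
          (fun d i => (PySem.List.pyRange 0 tall 1).foldl (fun d j => d.insert (i, j) ([] : List String)) d)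
          PySem.Dict.empty)).items).map (fun kv => (kv.1.1, kv.1.2, kv.2))
      = parse_image_alt wide tall line
    have h0 : ((PySem.List.pyRange 0 wide 1).foldl
          (fun d i => (PySem.List.pyRange 0 tall 1).foldl (fun d j => d.insert (i, j) ([] : List String)) d)
          PySem.Dict.empty)
        = PySem.Dict.mk ((pvCoords wide tall).map (fun k => (k, ([] : List String)))) := by
      apply PySem.Dict.ext
      simpa using items_image0 wide tall
    rw [h0]
    have hfst : ((pvCoords wide tall).map (fun k => (k, ([] : List String)))).map Prod.fst
        = pvCoords wide tall := by
      rw [List.map_map]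
      rw [show (Prod.fst ∘ fun k : Int × Int => (k, ([] : List String))) = id from rfl, List.map_id]
    rw [items_foldl_modify' coordf (pvChar line) _ _
      (by rw [hfst]; exact pvCoords_nodup' wide tall)
      (by rw [hfst]; intro p _; exact hcmem p)]
    -- now both sides are maps over the coordinate grid
    rw [List.map_map]
    simp only [parse_image_alt]
    unfold pvCoords
    simp only [List.map_flatMap]
    apply List.flatMap_congr
    intro i hi
    rw [List.map_map, List.map_map]
    apply List.map_congr_left
    intro j hj
    rw [PySem.List.mem_pyRange_one] at hi hj
    have hs0 : 0 ≤ j * wide + i := by nlinarith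
    have hs1 : j * wide + i < wide * tall := by nlinarith
    simp only [Function.comp_apply]
    have hfilt : (PySem.List.pyRange 0 n 1).filter (fun p => coordf p == (i, j))
        = PySem.List.pyRange (j * wide + i) n (wide * tall) := by
      rw [List.filter_congr (q := fun p => PySem.Int.mod p (wide * tall) == (j * wide + i)) ?_]
      · exact filter_stride n (j * wide + i) (wide * tall) hpix hs0 hs1
      · intro p hp
        rw [Bool.eq_iff_iff]
        simp only [beq_iff_eq]
        exact coord_eq_iff wide tall p i j hw ht hi.1 hi.2
    rw [hfilt]
    simp [hn, PySem.Str.len_eq]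

-- ===== VERDICT (by name: the statement is the Claim_ definition above) =====
theorem parse_image_spec : Claim_equal_parse_image := by
  intro wide tall line _ hpre
  exact main_eq wide tall line hpre
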